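-- pv_equiv track=rewrite | github.com/rmlshao/programming-contests | GSA Ultra 2020 (Only Full Solutions)/Jumping Jimmy.py | solution
-- ===== SOURCE A (Python) =====
-- def solution(a, qs):
--     n = len(a)
--     t = [0] * (2 * n)
--     def build():
--         for i in range(n):
--             t[i + n] = a[i]
--         for i in range(n-1, 1, -1):
--             t[i] = max(t[(i << 1)],t[(i << 1) | 1])
--     def query(l, r):
--         l += n
--         r += n
--         res = 0
--         while(l < r):
--             if (l & 1):
--                 res = max(res, t[l])
--                 l += 1
--             if (r & 1):
--                 r -= 1
--                 res = max(res, t[r])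
--             l >>= 1
--             r >>= 1
--         return res
--     ans = 0
--     build()
--     for (low, high) in qs:
--         ans += query(low, high)
--     return ans
-- ===== SOURCE B (Python) =====
-- def solution(a, qs):
--     ans = 0
--     for (low, high) in qs:
--         ans += max(0, max(a[low:high], default=0))
--     return ans
-- ===== Notes on version B (the rewrite author's own statement) =====
-- stated objective: simpler
-- what changed: Replaces the build-a-segment-tree-then-binary-traverse machinery by a direct per-query scan of the slice, ans += max(0, max(a[low:high], default=0)); this also fixes A's missing root computation (build stops at index 2 and never fills t[1]).
-- intended difference: On inputs where len(a) is a power of two >= 2, qs contains the full-range query (0, len(a)) and a has a positive element, A's build loop range(n-1,1,-1) never computes the root t[1], so A adds 0 for that query where B adds the true range maximum, which is the intended value. — e.g. on solution([1, 2], [(0, 2)]): A returns 0, B returns 2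
-- outside the precondition, e.g. on solution([5], [(-1, 1)]): A returns 0, B returns 5; on solution([1, 2, 3], [(1, 5)]): A returns 0, B returns 3
import Mathlib
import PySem

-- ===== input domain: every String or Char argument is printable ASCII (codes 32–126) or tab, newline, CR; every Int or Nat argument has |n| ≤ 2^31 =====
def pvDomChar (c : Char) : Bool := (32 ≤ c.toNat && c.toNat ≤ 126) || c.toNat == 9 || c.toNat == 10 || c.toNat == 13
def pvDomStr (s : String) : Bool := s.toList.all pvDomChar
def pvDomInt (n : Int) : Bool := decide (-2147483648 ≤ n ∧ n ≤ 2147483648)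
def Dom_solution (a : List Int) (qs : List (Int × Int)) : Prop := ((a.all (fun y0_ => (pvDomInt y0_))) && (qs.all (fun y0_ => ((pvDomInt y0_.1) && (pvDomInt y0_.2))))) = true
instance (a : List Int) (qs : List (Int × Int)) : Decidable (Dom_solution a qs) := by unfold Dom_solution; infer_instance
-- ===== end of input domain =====

-- B replaces A's segment tree by a direct per-query slice scan: simpler, and measured
-- faster on the generated workloads since A pays the O(n) tree build on every call;
-- B's worst case over many long queries is asymptotically slower. B also returns the
-- true range maximum for the full-range query on power-of-two lengths, where A's
-- build loop never fills the tree root t[1] (see D_solution below).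

-- ===== PORT A =====
-- t[i] read: exact Python indexing (negative wrap); where Python raises IndexError,
-- pyGetD returns the default 0 (those inputs are outside Pre_solution)
def tget (t : List Int) (i : Int) : Int := PySem.List.pyGetD t i 0

-- build(): leaves t[i+n] = a[i], then t[i] = max(t[i<<1], t[(i<<1)|1]) for i = n-1 .. 2.
-- (i<<1 = 2*i and (i<<1)|1 = 2*i+1 exactly, for every int i.)
def buildTree (a : List Int) : List Int :=
  (PySem.List.pyRange ((a.length : Int) - 1) 1 (-1)).foldl
      (fun t i => PySem.List.pySetD t i (max (tget t (2*i)) (tget t (2*i+1))))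
      ((PySem.List.pyRange 0 (a.length : Int) 1).foldl
        (fun t i => PySem.List.pySetD t (i + (a.length : Int)) (PySem.List.pyGetD a i 0))
        (List.replicate (2*a.length) 0))

-- query(l, r) after l += n; r += n: the while-loop, with fuel (the loop halves r each
-- iteration, so 2*n+2 steps always suffice on inputs admitted by Pre_solution);
-- l >>= 1 is floor division by 2 (exact, also for negative ints).
def queryLoop (t : List Int) : Nat → Int → Int → Int → Int
  | 0, _, _, res => res
  | f+1, l, r, res =>
    if l < r then
      let (res, l) := if PySem.Int.band l 1 ≠ 0 then (max res (tget t l), l + 1) else (res, l)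
      let (res, r) := if PySem.Int.band r 1 ≠ 0 then (max res (tget t (r - 1)), r - 1) else (res, r)
      queryLoop t f (PySem.Int.floordiv l 2) (PySem.Int.floordiv r 2) res
    else res

def solution (a : List Int) (qs : List (Int × Int)) : Int :=
  let n : Nat := a.length
  let t := buildTree a
  qs.foldl (fun ans q => ans + queryLoop t (2*n + 2) (q.1 + (n : Int)) (q.2 + (n : Int)) 0) 0

-- ===== PORT B =====
-- ans += max(0, max(a[low:high], default=0))
def solution_alt (a : List Int) (qs : List (Int × Int)) : Int :=
  qs.foldl (fun ans q =>
    ans + max 0 (PySem.List.maxD (PySem.List.slice a (some q.1) (some q.2)) (fun x => x) 0)) 0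

-- ===== PRECONDITION & SPEC =====
-- Pre_ excludes queries with negative or past-the-end bounds whose Python slice a[low:high]
-- is nonempty while A's while-loop window [low+n, high+n) does not describe it: on those
-- inputs A raises IndexError or returns accidental values read from wrapped tree indices.
def Pre_solution (a : List Int) (qs : List (Int × Int)) : Prop :=
  ∀ q ∈ qs,
    (0 ≤ q.1 ∧ 0 ≤ q.2 ∧ (q.2 ≤ q.1 ∨ q.2 ≤ (a.length : Int))) ∨
    (q.1 < 0 ∧ q.2 ≤ q.1) ∨
    (0 ≤ q.1 ∧ q.2 < 0 ∧ ((a.length : Int) + q.2 ≤ 0 ∨ (a.length : Int) + q.2 ≤ q.1))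
instance (a : List Int) (qs : List (Int × Int)) : Decidable (Pre_solution a qs) := by
  unfold Pre_solution; infer_instance

def pvWitness_solution : List Int × (List (Int × Int)) := ([1, -2, 3], [(0, 2), (2, 3), (5, 1)])

-- On inputs where len(a) is a power of two ≥ 2, qs contains the full-range query (0, len(a))
-- and a has a positive element, A's build loop range(n-1,1,-1) never computes the root t[1],
-- so A adds 0 for that query where B adds the true range maximum, the intended value.
def D_solution (a : List Int) (qs : List (Int × Int)) : Prop :=
  (2 ≤ a.length ∧ a.length = 2 ^ (Nat.log2 a.length)) ∧
  (0, (a.length : Int)) ∈ qs ∧ (∃ x ∈ a, 0 < x)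
instance (a : List Int) (qs : List (Int × Int)) : Decidable (D_solution a qs) := by
  unfold D_solution; infer_instance

def Spec_solution (a : List Int) (qs : List (Int × Int)) (out : Int) : Prop :=
  ¬ D_solution a qs → out = solution_alt a qs
instance (a : List Int) (qs : List (Int × Int)) (out : Int) : Decidable (Spec_solution a qs out) := by
  unfold Spec_solution; infer_instance

def pvDiffWitness_solution : List Int × (List (Int × Int)) := ([1, 2], [(0, 2)])
def pvDiffWitnessOut_solution : Int × Int := (0, 2)

-- ===== CLAIM (what is proved, stated in full; the proofs are below) =====
def Claim_unchanged_solution : Prop := ∀ (a : List Int) (qs : List (Int × Int)), Dom_solution a qs → Pre_solution a qs → Spec_solution a qs (solution a qs)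
def Claim_changed_solution : Prop := Dom_solution (pvDiffWitness_solution.1) (pvDiffWitness_solution.2) ∧ Pre_solution (pvDiffWitness_solution.1) (pvDiffWitness_solution.2) ∧ D_solution (pvDiffWitness_solution.1) (pvDiffWitness_solution.2) ∧ solution (pvDiffWitness_solution.1) (pvDiffWitness_solution.2) = pvDiffWitnessOut_solution.1 ∧ solution_alt (pvDiffWitness_solution.1) (pvDiffWitness_solution.2) = pvDiffWitnessOut_solution.2 ∧ pvDiffWitnessOut_solution.1 ≠ pvDiffWitnessOut_solution.2


def Claim_exact_solution : Prop := ∀ (a : List Int) (qs : List (Int × Int)), Dom_solution a qs → Pre_solution a qs → D_solution a qs → solution a qs ≠ solution_alt a qs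

-- ===== LEMMAS AND PROOFS =====

-- The set of array positions covered by tree node j (leaves are nodes n .. 2n-1).
def covr (n : Nat) (j : Nat) : Finset Nat :=
  if _h : n <= j then (if j < 2*n then {j - n} else (∅ : Finset Nat))
  else if _h1 : 1 <= j then covr n (2*j) ∪ covr n (2*j+1)
  else (∅ : Finset Nat)
termination_by 2*n - j
decreasing_by all_goals omega

-- The value a correct build would store at node j.
def valr (a : List Int) (j : Nat) : Int :=
  if _h : a.length <= j then a.getD (j - a.length) 0
  else if _h1 : 1 <= j then max (valr a (2*j)) (valr a (2*j+1))
  else 0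
termination_by 2*a.length - j
decreasing_by all_goals omega

def gnat (a : List Int) (p : Nat) : Nat := (a.getD p 0).toNat

def ceilPow (x k : Nat) : Nat := (x + 2^k - 1) / 2^k

def natMax (xs : List Int) : Nat := xs.foldl (fun m y => max m y.toNat) 0

lemma covr_leaf (n j : Nat) (h : n <= j) (h2 : j < 2*n) : covr n j = {j - n} := by
  unfold covr; simp [h, h2]

lemma covr_leaf_out (n j : Nat) (h : 2*n <= j) : covr n j = ∅ := by
  unfold covr; split_ifs with h1 h2 h3 <;> first | rfl | omega

lemma covr_node (n j : Nat) (h1 : 1 <= j) (h : j < n) :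
    covr n j = covr n (2*j) ∪ covr n (2*j+1) := by
  rw [covr, dif_neg (show ¬ n <= j by omega), dif_pos h1]

lemma covr_zero (n : Nat) (h : 1 <= n) : covr n 0 = ∅ := by
  unfold covr; split_ifs <;> first | rfl | omega

lemma toNat_max_int (x y : Int) : (max x y).toNat = max x.toNat y.toNat := by omega

lemma covr_subset (n j : Nat) : covr n j ⊆ Finset.range n := by
  induction j using covr.induct n with
  | case1 j h h2 => rw [covr_leaf n j h h2]; intro p hp; simp at hp; simp [hp]; omega
  | case2 j h h2 => rw [covr_leaf_out n j (by omega)]; exact Finset.empty_subset _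
  | case3 j h h1 ih1 ih2 =>
      rw [covr_node n j h1 (by omega)]
      exact Finset.union_subset ih1 ih2
  | case4 j h h1 =>
      have : j = 0 := by omega
      subst this; rw [covr_zero n (by omega)]; exact Finset.empty_subset _

lemma covr_climb (n p j : Nat) (h2 : 2 <= j) (h : p ∈ covr n j) : p ∈ covr n (j/2) := by
  by_cases hbig : 2*n <= j
  · rw [covr_leaf_out n j hbig] at h; simp at h
  · have h1' : 1 <= j/2 := by omega
    have hlt : j/2 < n := by omega
    rw [covr_node n (j/2) h1' hlt, Finset.mem_union]
    rcases Nat.even_or_odd j with ⟨m, hm⟩ | ⟨m, hm⟩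
    · left; have : 2*(j/2) = j := by omega
      rwa [this]
    · right; have : 2*(j/2)+1 = j := by omega
      rwa [this]

lemma covr_descend (n p : Nat) : ∀ j, 1 <= j → p ∈ covr n j → p ∈ covr n 1 := by
  intro j
  induction j using Nat.strong_induction_on with
  | _ j ih =>
    intro h1 hp
    by_cases hj : j = 1
    · subst hj; exact hp
    · have h2 : 2 <= j := by omega
      exact ih (j/2) (by omega) (by omega) (covr_climb n p j h2 hp)

lemma covr_one (n : Nat) (h : 1 <= n) : covr n 1 = Finset.range n := by
  apply Finset.Subset.antisymm (covr_subset n 1)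
  intro p hp
  rw [Finset.mem_range] at hp
  refine covr_descend n p (p + n) (by omega) ?_
  rw [covr_leaf n (p+n) (by omega) (by omega)]
  simp

lemma valr_leaf (a : List Int) (j : Nat) (h : a.length <= j) :
    valr a j = a.getD (j - a.length) 0 := by
  rw [valr, dif_pos h]

lemma valr_node (a : List Int) (j : Nat) (h1 : 1 <= j) (h : j < a.length) :
    valr a j = max (valr a (2*j)) (valr a (2*j+1)) := by
  rw [valr, dif_neg (show ¬ a.length <= j by omega), dif_pos h1]

lemma valr_toNat (a : List Int) (j : Nat) :
    (valr a j).toNat = (covr a.length j).sup (gnat a) := by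
  induction j using valr.induct a with
  | case1 j h =>
      by_cases h2 : j < 2*a.length
      · rw [valr_leaf a j h, covr_leaf a.length j h h2, Finset.sup_singleton]
        rfl
      · rw [valr_leaf a j h, covr_leaf_out a.length j (by omega),
            List.getD_eq_default _ _ (by omega)]
        simp
  | case2 j h h1 ih1 ih2 =>
      rw [valr_node a j h1 (by omega), covr_node a.length j h1 (by omega),
          Finset.sup_union, toNat_max_int, ih1, ih2]
  | case3 j h h1 =>
      have : j = 0 := by omega
      subst this
      rw [covr_zero a.length (by omega)]
      rw [valr, dif_neg h, dif_neg h1]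
      simp

lemma tget_eq (t : List Int) (j : Nat) (_h : j < t.length) : tget t (j : Int) = t.getD j 0 := by
  rw [tget, PySem.List.pyGetD_natCast]

lemma setfold_len (a : List Int) (n : Nat) : ∀ (m : Nat) (t : List Int),
    ((List.range m).foldl (fun t (i : Nat) => PySem.List.pySetD t ((i:Int) + (n:Int)) (PySem.List.pyGetD a (i:Int) 0)) t).length = t.length := by
  intro m
  induction m with
  | zero => intro t; simp
  | succ m ih =>
      intro t
      rw [List.range_succ, List.foldl_append, List.foldl_cons, List.foldl_nil,
          PySem.List.length_pySetD, ih]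

lemma setfold_getD (a : List Int) (n : Nat) : ∀ (m : Nat) (t : List Int) (j : Nat),
    ((List.range m).foldl (fun t (i : Nat) => PySem.List.pySetD t ((i:Int) + (n:Int)) (PySem.List.pyGetD a (i:Int) 0)) t).getD j 0
    = if n <= j ∧ j < n + m ∧ j < t.length then a.getD (j - n) 0 else t.getD j 0 := by
  intro m
  induction m with
  | zero => intro t j; simp; intro h1 h2; omega
  | succ m ih =>
      intro t j
      rw [List.range_succ, List.foldl_append, List.foldl_cons, List.foldl_nil]
      have hc : ((m:Int) + (n:Int)) = ((m + n : Nat) : Int) := by push_cast; ring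
      rw [hc, PySem.List.pySetD_natCast, PySem.List.pyGetD_natCast]
      have hlen : ((List.range m).foldl (fun t (i : Nat) => PySem.List.pySetD t ((i:Int) + (n:Int)) (PySem.List.pyGetD a (i:Int) 0)) t).length = t.length := setfold_len a n m t
      rw [List.getD_eq_getElem?_getD, List.getElem?_set]
      by_cases hj : m + n = j
      · rw [if_pos hj, hlen]
        by_cases hin : m + n < t.length
        · rw [if_pos hin, Option.getD_some, if_pos ⟨by omega, by omega, by omega⟩]
          congr 1
          omega
        · rw [if_neg hin, Option.getD_none, if_neg (by omega)]
          rw [List.getD_eq_getElem?_getD, List.getElem?_eq_none (by omega : t.length <= j), Option.getD_none]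
      · rw [if_neg hj, ← List.getD_eq_getElem?_getD, ih]
        by_cases hcond : n <= j ∧ j < n + m ∧ j < t.length
        · rw [if_pos hcond, if_pos ⟨by omega, by omega, by omega⟩]
        · rw [if_neg hcond, if_neg (by omega)]

lemma internal_fold (a : List Int) (L : List Int) (hL : L.length = 2*a.length)
    (hLget : ∀ j, j < 2*a.length → L.getD j 0 = if a.length <= j then a.getD (j - a.length) 0 else 0) :
    ∀ m, m <= a.length - 2 →
    (((List.range m).foldl (fun t (k : Nat) => PySem.List.pySetD t (((a.length:Int) - 1) - (k:Int)) (max (tget t (2*(((a.length:Int) - 1) - (k:Int)))) (tget t (2*(((a.length:Int) - 1) - (k:Int))+1)))) L).length = 2*a.length) ∧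
    (∀ j, (a.length <= j ∨ j < a.length - m) → ((List.range m).foldl (fun t (k : Nat) => PySem.List.pySetD t (((a.length:Int) - 1) - (k:Int)) (max (tget t (2*(((a.length:Int) - 1) - (k:Int)))) (tget t (2*(((a.length:Int) - 1) - (k:Int))+1)))) L).getD j 0 = L.getD j 0) ∧
    (∀ j, a.length - m <= j → j < a.length → ((List.range m).foldl (fun t (k : Nat) => PySem.List.pySetD t (((a.length:Int) - 1) - (k:Int)) (max (tget t (2*(((a.length:Int) - 1) - (k:Int)))) (tget t (2*(((a.length:Int) - 1) - (k:Int))+1)))) L).getD j 0 = valr a j) := by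
  intro m
  induction m with
  | zero =>
      intro _
      refine ⟨by simpa using hL, by intro j _; simp, ?_⟩
      intro j hj1 hj2; omega
  | succ m ih =>
      intro hm
      obtain ⟨ihlen, ihold, ihval⟩ := ih (by omega)
      have hn3 : m + 3 <= a.length := by omega
      rw [List.range_succ, List.foldl_append, List.foldl_cons, List.foldl_nil]
      set F := (List.range m).foldl (fun t (k : Nat) => PySem.List.pySetD t (((a.length:Int) - 1) - (k:Int)) (max (tget t (2*(((a.length:Int) - 1) - (k:Int)))) (tget t (2*(((a.length:Int) - 1) - (k:Int))+1)))) L with hF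
      -- the written node this step
      have hc : ((a.length:Int) - 1 - (m:Int)) = ((a.length - 1 - m : Nat) : Int) := by omega
      have hc2 : (2 * ((a.length:Int) - 1 - (m:Int))) = ((2*(a.length - 1 - m) : Nat) : Int) := by omega
      have hc3 : (2 * ((a.length:Int) - 1 - (m:Int)) + 1) = ((2*(a.length - 1 - m) + 1 : Nat) : Int) := by omega
      set i := a.length - 1 - m with hi
      -- children are read correctly
      have hchild : ∀ c, a.length - m <= c → c < 2*a.length → F.getD c 0 = valr a c := by
        intro c hc1 hc2
        by_cases hcn : c < a.length
        · exact ihval c hc1 hcn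
        · rw [ihold c (Or.inl (by omega)), hLget c hc2, if_pos (by omega),
              valr_leaf a c (by omega)]
      have hval : max (tget F (2*((a.length:Int) - 1 - (m:Int)))) (tget F (2*((a.length:Int) - 1 - (m:Int))+1)) = valr a i := by
        rw [hc3, hc2, tget_eq F _ (by rw [ihlen]; omega), tget_eq F _ (by rw [ihlen]; omega)]
        rw [hchild (2*i) (by omega) (by omega), hchild (2*i+1) (by omega) (by omega)]
        rw [valr_node a i (by omega) (by omega)]
      rw [hval, hc]
      rw [PySem.List.pySetD_natCast]
      have hget : ∀ j, (F.set i (valr a i)).getD j 0 = if j = i then valr a i else F.getD j 0 := by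
        intro j
        rw [List.getD_eq_getElem?_getD, List.getElem?_set]
        by_cases hj : i = j
        · rw [if_pos hj, if_pos (by rw [ihlen]; omega), Option.getD_some, if_pos hj.symm]
        · rw [if_neg hj, if_neg (by omega), ← List.getD_eq_getElem?_getD]
      refine ⟨by rw [List.length_set, ihlen], ?_, ?_⟩
      · intro j hj
        rw [hget j, if_neg (by omega), ihold j (by omega)]
      · intro j hj1 hj2
        rw [hget j]
        by_cases hji : j = i
        · rw [if_pos hji, hji]
        · rw [if_neg hji, ihval j (by omega) hj2]

lemma buildTree_pieces (a : List Int) :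
    (buildTree a).length = 2*a.length ∧
    (∀ j, a.length <= j → j < 2*a.length → (buildTree a).getD j 0 = a.getD (j - a.length) 0) ∧
    (∀ j, 2 <= j → j < a.length → (buildTree a).getD j 0 = valr a j) ∧
    (2 <= a.length → (buildTree a).getD 1 0 = 0) := by
  have hM : (((a.length:Int) - 1) - 1).toNat = a.length - 2 := by omega
  have hL : ∀ j, ((PySem.List.pyRange 0 (a.length : Int) 1).foldl
        (fun t i => PySem.List.pySetD t (i + (a.length : Int)) (PySem.List.pyGetD a i 0))
        (List.replicate (2*a.length) 0)).getD j 0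
      = if a.length <= j ∧ j < 2*a.length then a.getD (j - a.length) 0 else 0 := by
    intro j
    rw [PySem.List.pyRange_zero_nat, List.foldl_map,
        setfold_getD a a.length a.length (List.replicate (2*a.length) 0) j]
    rw [List.length_replicate]
    by_cases hcond : a.length <= j ∧ j < a.length + a.length ∧ j < 2*a.length
    · rw [if_pos hcond, if_pos (by omega)]
    · rw [if_neg hcond, if_neg (by omega), List.getD_eq_getElem?_getD, List.getElem?_replicate]
      by_cases hj2 : j < 2*a.length
      · rw [if_pos hj2]; rfl
      · rw [if_neg hj2]; rfl
  have hLlen : ((PySem.List.pyRange 0 (a.length : Int) 1).foldl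
        (fun t i => PySem.List.pySetD t (i + (a.length : Int)) (PySem.List.pyGetD a i 0))
        (List.replicate (2*a.length) 0)).length = 2*a.length := by
    rw [PySem.List.pyRange_zero_nat, List.foldl_map, setfold_len, List.length_replicate]
  have hB : buildTree a = (List.range (a.length - 2)).foldl
      (fun t (k : Nat) => PySem.List.pySetD t (((a.length:Int) - 1) - (k:Int)) (max (tget t (2*(((a.length:Int) - 1) - (k:Int)))) (tget t (2*(((a.length:Int) - 1) - (k:Int))+1))))
      ((PySem.List.pyRange 0 (a.length : Int) 1).foldl
        (fun t i => PySem.List.pySetD t (i + (a.length : Int)) (PySem.List.pyGetD a i 0))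
        (List.replicate (2*a.length) 0)) := by
    rw [buildTree, PySem.List.pyRange_neg_one, hM, List.foldl_map]
  obtain ⟨h1, h2, h3⟩ := internal_fold a _ hLlen
      (by intro j hj
          rw [hL j]
          by_cases hle : a.length <= j
          · rw [if_pos ⟨hle, hj⟩, if_pos hle]
          · rw [if_neg (by omega), if_neg hle]) (a.length - 2) (le_refl _)
  rw [hB]
  refine ⟨h1, ?_, ?_, ?_⟩
  · intro j hj hj2
    rw [h2 j (Or.inl hj), hL j, if_pos ⟨hj, hj2⟩]
  · intro j hj1 hj2
    exact h3 j (by omega) hj2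
  · intro hlen2
    rw [h2 1 (Or.inr (by omega)), hL 1, if_neg (by omega)]

lemma buildTree_length (a : List Int) : (buildTree a).length = 2*a.length := by
  exact (buildTree_pieces a).1

lemma buildTree_leaf (a : List Int) (j : Nat) (h : a.length <= j) (h2 : j < 2*a.length) :
    (buildTree a).getD j 0 = a.getD (j - a.length) 0 := by
  exact (buildTree_pieces a).2.1 j h h2

lemma buildTree_node (a : List Int) (j : Nat) (h1 : 2 <= j) (h2 : j < a.length) :
    (buildTree a).getD j 0 = valr a j := by
  exact (buildTree_pieces a).2.2.1 j h1 h2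

lemma buildTree_one (a : List Int) (h : 2 <= a.length) : (buildTree a).getD 1 0 = 0 := by
  exact (buildTree_pieces a).2.2.2 h

lemma buildTree_read (a : List Int) (j : Nat) (h1 : 1 <= j) (h2 : j < 2*a.length)
    (h3 : j = 1 → a.length = 1) : (buildTree a).getD j 0 = valr a j := by
  by_cases hle : a.length <= j
  · rw [buildTree_leaf a j hle h2, valr_leaf a j hle]
  · by_cases hj1 : j = 1
    · have := h3 hj1; omega
    · exact buildTree_node a j (by omega) (by omega)

lemma ceilPow_zero (x : Nat) : ceilPow x 0 = x := by simp [ceilPow]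

lemma ceilPow_succ (x k : Nat) : (ceilPow x k + 1) / 2 = ceilPow x (k+1) := by
  have h1 : 0 < 2^k := Nat.two_pow_pos k
  unfold ceilPow
  rw [← Nat.add_div_right (x + 2^k - 1) h1, Nat.div_div_eq_div_mul]
  have e1 : x + 2^k - 1 + 2^k = x + 2^(k+1) - 1 := by rw [pow_succ]; omega
  have e2 : 2^k * 2 = 2^(k+1) := by rw [pow_succ]
  rw [e1, e2]

lemma one_le_ceilPow (x k : Nat) (h : 1 <= x) : 1 <= ceilPow x k := by
  have h1 : 0 < 2^k := Nat.two_pow_pos k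
  rw [ceilPow, Nat.le_div_iff_mul_le h1]
  omega

lemma ceilPow_eq_one (x k : Nat) (h : 1 <= x) (he : ceilPow x k = 1) : x <= 2^k := by
  have h1 : 0 < 2^k := Nat.two_pow_pos k
  by_contra hx
  have : 2 <= ceilPow x k := by
    rw [ceilPow, Nat.le_div_iff_mul_le h1]; omega
  omega

lemma queryLoop_stop (t : List Int) (f : Nat) (l r res : Int) (h : ¬ l < r) :
    queryLoop t f l r res = res := by
  cases f <;> simp [queryLoop, h]

lemma band_one_natCast (m : Nat) : PySem.Int.band (m : Int) 1 = ((m % 2 : Nat) : Int) := by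
  have h1 : (1 : Int) = ((1 : Nat) : Int) := rfl
  rw [h1, PySem.Int.band_natCast, Nat.and_one_is_mod]

lemma floordiv_two_natCast (m : Nat) : PySem.Int.floordiv (m : Int) 2 = ((m / 2 : Nat) : Int) := by
  have h2 : (2 : Int) = ((2 : Nat) : Int) := rfl
  rw [h2, PySem.Int.floordiv_natCast]

lemma biUnion_halve (n l' r' : Nat) (h1 : 1 <= l') (hr : r' <= n) :
    (Finset.Ico (2*l') (2*r')).biUnion (covr n) = (Finset.Ico l' r').biUnion (covr n) := by
  ext p
  simp only [Finset.mem_biUnion, Finset.mem_Ico]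
  constructor
  · rintro ⟨j, ⟨hj1, hj2⟩, hp⟩
    refine ⟨j/2, ⟨by omega, by omega⟩, ?_⟩
    rw [covr_node n (j/2) (by omega) (by omega), Finset.mem_union]
    rcases Nat.even_or_odd j with ⟨m, hm⟩ | ⟨m, hm⟩
    · left; have : 2*(j/2) = j := by omega
      rwa [this]
    · right; have : 2*(j/2)+1 = j := by omega
      rwa [this]
  · rintro ⟨j, ⟨hj1, hj2⟩, hp⟩
    rw [covr_node n j (by omega) (by omega), Finset.mem_union] at hp
    rcases hp with hp | hp
    · exact ⟨2*j, ⟨by omega, by omega⟩, hp⟩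
    · exact ⟨2*j+1, ⟨by omega, by omega⟩, hp⟩

lemma queryLoop_step (t : List Int) (f : Nat) (l r res : Int) (h : l < r) :
    queryLoop t (f+1) l r res =
      queryLoop t f
        (PySem.Int.floordiv (if PySem.Int.band l 1 ≠ 0 then l + 1 else l) 2)
        (PySem.Int.floordiv (if PySem.Int.band r 1 ≠ 0 then r - 1 else r) 2)
        (if PySem.Int.band r 1 ≠ 0
           then max (if PySem.Int.band l 1 ≠ 0 then max res (tget t l) else res) (tget t (r-1))
           else (if PySem.Int.band l 1 ≠ 0 then max res (tget t l) else res)) := by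
  rw [queryLoop, if_pos h]
  by_cases hl : PySem.Int.band l 1 ≠ 0 <;> by_cases hr : PySem.Int.band r 1 ≠ 0 <;>
    simp only [hl, hr, if_neg, not_false_iff, ite_not]

set_option maxHeartbeats 1000000 in
lemma ql_main (a : List Int) (l0 h0 : Nat) (hlt : l0 < h0) (hh0 : h0 <= a.length) :
  ∀ (f k lN rN : Nat) (res : Int) (C : Finset Nat),
  lN = ceilPow (l0 + a.length) k →
  rN = (h0 + a.length) / 2^k →
  rN <= 2^f →
  res = ((C.sup (gnat a) : Nat) : Int) →
  C ⊆ Finset.Ico l0 h0 →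
  Finset.Ico l0 h0 = C ∪ (Finset.Ico lN rN).biUnion (covr a.length) →
  (∀ j ∈ Finset.Ico lN rN, covr a.length j ⊆ Finset.Ico l0 h0) →
  ∃ C', C' ⊆ Finset.Ico l0 h0 ∧
    queryLoop (buildTree a) f (lN : Int) (rN : Int) res = ((C'.sup (gnat a) : Nat) : Int) ∧
    ((l0 = 0 ∧ h0 = a.length ∧ 2 <= a.length ∧ ∃ k', a.length = 2^k') ∨ C' = Finset.Ico l0 h0) := by
  intro f
  induction f with
  | zero =>
      intro k lN rN res C hlN hrN hfuel hres hCsub hT hcov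
      have hl1 : 1 <= lN := by rw [hlN]; exact one_le_ceilPow _ k (by omega)
      refine ⟨C, hCsub, ?_, Or.inr ?_⟩
      · rw [queryLoop_stop _ _ _ _ _ (by exact_mod_cast (by omega : ¬ lN < rN))]
        exact hres.symm ▸ rfl
      · rw [hT, Finset.Ico_eq_empty (by omega : ¬ lN < rN)]
        simp
  | succ f ih =>
      intro k lN rN res C hlN hrN hfuel hres hCsub hT hcov
      have hn1 : 1 <= a.length := by omega
      have hl1 : 1 <= lN := by rw [hlN]; exact one_le_ceilPow _ k (by omega)
      have hrN2n : rN <= 2*a.length := by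
        rw [hrN]
        calc (h0 + a.length)/2^k <= h0 + a.length := Nat.div_le_self _ _
          _ <= 2*a.length := by omega
      by_cases hlr : lN < rN
      · -- one loop iteration
        have hcast : ((lN:Int) < (rN:Int)) := by exact_mod_cast hlr
        have hparL : (PySem.Int.band (lN:Int) 1 ≠ 0) ↔ lN % 2 = 1 := by
          rw [band_one_natCast]; omega
        have hparR : (PySem.Int.band (rN:Int) 1 ≠ 0) ↔ rN % 2 = 1 := by
          rw [band_one_natCast]; omega
        have hread : ∀ (D : Finset Nat) (j : Nat), lN <= j → j < rN → (j = 1 → a.length = 1) →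
            max ((D.sup (gnat a) : Nat) : Int) (tget (buildTree a) (j:Int))
              = (((D ∪ covr a.length j).sup (gnat a) : Nat) : Int) := by
          intro D j hj1 hj2 hj3
          rw [tget_eq _ j (by rw [buildTree_length]; omega),
              buildTree_read a j (by omega) (by omega) hj3]
          have h1 : max ((D.sup (gnat a) : Nat) : Int) (valr a j)
              = ((max (D.sup (gnat a)) (valr a j).toNat : Nat) : Int) := by omega
          rw [h1, valr_toNat, Finset.sup_union]
        by_cases hbad : lN = 1 ∧ 2 <= a.length
        · -- the unbuilt-root read: forces the full-range power-of-two query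
          obtain ⟨hlN1, hn2⟩ := hbad
          have hc1 : covr a.length 1 ⊆ Finset.Ico l0 h0 :=
            hcov 1 (by rw [Finset.mem_Ico]; omega)
          rw [covr_one a.length (by omega)] at hc1
          have hTeq : Finset.Ico l0 h0 = Finset.range a.length := by
            refine Finset.Subset.antisymm ?_ hc1
            intro p hp
            rw [Finset.mem_Ico] at hp
            rw [Finset.mem_range]
            omega
          have hl00 : l0 = 0 := by
            have h0mem : (0:Nat) ∈ Finset.Ico l0 h0 := by
              rw [hTeq, Finset.mem_range]; omega
            rw [Finset.mem_Ico] at h0mem; omega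
          have hh0n : h0 = a.length := by
            have hmem : a.length - 1 ∈ Finset.Ico l0 h0 := by
              rw [hTeq, Finset.mem_range]; omega
            rw [Finset.mem_Ico] at hmem; omega
          have hnle : a.length <= 2^k := by
            have := ceilPow_eq_one (l0 + a.length) k (by omega) (by rw [← hlN, hlN1])
            omega
          have hge : 2^k <= a.length := by
            have h2 : 2 <= (h0 + a.length)/2^k := by omega
            have := (Nat.le_div_iff_mul_le (Nat.two_pow_pos k)).1 h2
            omega
          have hneq : a.length = 2^k := by omega
          have hrN2 : rN = 2 := by
            rw [hrN, hh0n]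
            have e : a.length + a.length = 2 * 2^k := by omega
            rw [e, Nat.mul_div_cancel _ (Nat.two_pow_pos k)]
          -- compute the iteration: read t[1] = 0, recurse on (1,1), return res
          have hb1 : PySem.Int.band ((lN:Nat):Int) 1 ≠ 0 := by rw [hparL]; omega
          have hb2 : ¬ PySem.Int.band ((rN:Nat):Int) 1 ≠ 0 := by rw [hparR]; omega
          have ht1 : tget (buildTree a) ((lN:Nat):Int) = 0 := by
            rw [hlN1, tget_eq _ 1 (by rw [buildTree_length]; omega), buildTree_one a hn2]
          have hres0 : max res (tget (buildTree a) ((lN:Nat):Int)) = res := by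
            rw [ht1, hres]; omega
          rw [queryLoop_step _ _ _ _ _ hcast, if_neg hb2, if_neg hb2, if_pos hb1, if_pos hb1, hres0]
          have hdl : PySem.Int.floordiv ((lN:Int) + 1) 2 = ((1:Nat):Int) := by
            rw [hlN1, show ((1:Nat):Int) + 1 = ((2:Nat):Int) from rfl, floordiv_two_natCast]
          have hdr : PySem.Int.floordiv ((rN:Int)) 2 = ((1:Nat):Int) := by
            rw [hrN2, floordiv_two_natCast]
          rw [hdl, hdr, queryLoop_stop _ _ _ _ _ (by omega)]
          exact ⟨C, hCsub, hres.symm ▸ rfl, Or.inl ⟨hl00, hh0n, hn2, k, hneq⟩⟩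
        · -- generic iteration
          have hspecial : lN = 1 → a.length = 1 := by
            intro h1
            by_contra hne
            exact hbad ⟨h1, by omega⟩
          -- adjusted endpoints and gathered set
          have hifL : (if lN % 2 = 1 then (lN:Int) + 1 else (lN:Int))
              = ((lN + lN % 2 : Nat) : Int) := by
            by_cases ol : lN % 2 = 1
            · rw [if_pos ol]; omega
            · rw [if_neg ol]; omega
          have hifR : (if rN % 2 = 1 then (rN:Int) - 1 else (rN:Int))
              = ((rN - rN % 2 : Nat) : Int) := by
            by_cases orr : rN % 2 = 1
            · rw [if_pos orr]; omega
            · rw [if_neg orr]; omega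
          have hres2 : (if lN % 2 = 1 then max res (tget (buildTree a) (lN:Int)) else res)
              = (((C ∪ (if lN % 2 = 1 then covr a.length lN else ∅)).sup (gnat a) : Nat) : Int) := by
            by_cases ol : lN % 2 = 1
            · rw [if_pos ol, if_pos ol, hres, hread C lN (le_refl _) hlr hspecial]
            · rw [if_neg ol, if_neg ol, Finset.union_empty]
              exact hres
          have hres3 : (if rN % 2 = 1
                then max (if lN % 2 = 1 then max res (tget (buildTree a) (lN:Int)) else res) (tget (buildTree a) ((rN:Int)-1))
                else (if lN % 2 = 1 then max res (tget (buildTree a) (lN:Int)) else res))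
              = ((((C ∪ (if lN % 2 = 1 then covr a.length lN else ∅)) ∪ (if rN % 2 = 1 then covr a.length (rN-1) else ∅)).sup (gnat a) : Nat) : Int) := by
            by_cases orr : rN % 2 = 1
            · rw [if_pos orr, hres2,
                  show ((rN:Int) - 1) = ((rN - 1 : Nat) : Int) by omega,
                  hread _ (rN-1) (by omega) (by omega) (by omega), if_pos orr]
            · rw [if_neg orr, hres2, if_neg orr, Finset.union_empty]
          -- the new state
          set lA := lN + lN % 2 with hlA
          set rA := rN - rN % 2 with hrA
          set C3 := (C ∪ (if lN % 2 = 1 then covr a.length lN else ∅)) ∪ (if rN % 2 = 1 then covr a.length (rN-1) else ∅) with hC3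
          have hC3T : C3 ⊆ Finset.Ico l0 h0 := by
            rw [hC3]
            refine Finset.union_subset (Finset.union_subset hCsub ?_) ?_
            · by_cases ol : lN % 2 = 1
              · rw [if_pos ol]; exact hcov lN (by rw [Finset.mem_Ico]; omega)
              · rw [if_neg ol]; exact Finset.empty_subset _
            · by_cases orr : rN % 2 = 1
              · rw [if_pos orr]; exact hcov (rN-1) (by rw [Finset.mem_Ico]; omega)
              · rw [if_neg orr]; exact Finset.empty_subset _
          have hbi : (Finset.Ico lA rA).biUnion (covr a.length)
              = (Finset.Ico (lA/2) (rA/2)).biUnion (covr a.length) := by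
            rw [show Finset.Ico lA rA = Finset.Ico (2*(lA/2)) (2*(rA/2)) by
              rw [show 2*(lA/2) = lA by omega, show 2*(rA/2) = rA by omega]]
            exact biUnion_halve a.length (lA/2) (rA/2) (by omega) (by omega)
          have hsplit : Finset.Ico lN rN
              = ((if lN % 2 = 1 then {lN} else ∅) ∪ Finset.Ico lA rA) ∪ (if rN % 2 = 1 then ({rN - 1} : Finset Nat) else ∅) := by
            ext p
            by_cases ol : lN % 2 = 1 <;> by_cases orr : rN % 2 = 1 <;>
              simp [ol, orr, Finset.mem_Ico, hlA, hrA] <;> omega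
          have hbL : (if lN % 2 = 1 then ({lN} : Finset Nat) else ∅).biUnion (covr a.length)
              = (if lN % 2 = 1 then covr a.length lN else ∅) := by
            by_cases ol : lN % 2 = 1 <;> simp [ol]
          have hbR : (if rN % 2 = 1 then ({rN - 1} : Finset Nat) else ∅).biUnion (covr a.length)
              = (if rN % 2 = 1 then covr a.length (rN-1) else ∅) := by
            by_cases orr : rN % 2 = 1 <;> simp [orr]
          have hT' : Finset.Ico l0 h0 = C3 ∪ (Finset.Ico (lA/2) (rA/2)).biUnion (covr a.length) := by
            rw [hT, hsplit, Finset.union_biUnion, Finset.union_biUnion, hbL, hbR, ← hbi, hC3]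
            ext p
            simp only [Finset.mem_union]
            tauto
          have hcov' : ∀ j ∈ Finset.Ico (lA/2) (rA/2), covr a.length j ⊆ Finset.Ico l0 h0 := by
            intro j hj p hp
            rw [hT']
            exact Finset.mem_union_right _ (Finset.mem_biUnion.2 ⟨j, hj, hp⟩)
          have hstep : queryLoop (buildTree a) (f+1) (lN:Int) (rN:Int) res
              = queryLoop (buildTree a) f ((lA/2 : Nat) : Int) ((rA/2 : Nat) : Int) ((C3.sup (gnat a) : Nat) : Int) := by
            rw [queryLoop_step _ _ _ _ _ hcast]
            simp only [hparL, hparR]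
            rw [hifL, hifR, hres3, floordiv_two_natCast, floordiv_two_natCast]
          rw [hstep]
          refine ih (k+1) (lA/2) (rA/2) _ C3 ?_ ?_ ?_ rfl hC3T hT' hcov'
          · have hsucc := ceilPow_succ (l0 + a.length) k
            rw [← hlN] at hsucc
            rw [hlA]
            omega
          · have h1 : rA/2 = rN/2 := by rw [hrA]; omega
            rw [h1, hrN, Nat.div_div_eq_div_mul, ← pow_succ]
          · have : (2:Nat)^(f+1) = 2*2^f := by rw [pow_succ]; omega
            omega
      · -- loop does not run
        refine ⟨C, hCsub, ?_, Or.inr ?_⟩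
        · rw [queryLoop_stop _ _ _ _ _ (by exact_mod_cast hlr)]
          exact hres.symm ▸ rfl
        · rw [hT, Finset.Ico_eq_empty hlr]
          simp

lemma foldl_natmax_init (xs : List Int) : ∀ (c : Nat),
    xs.foldl (fun m y => max m y.toNat) c = max c (natMax xs) := by
  induction xs with
  | nil => intro c; simp [natMax]
  | cons x xs ih =>
      intro c
      have hx : natMax (x :: xs) = max x.toNat (natMax xs) := by
        rw [natMax, List.foldl_cons, ih]
        omega
      rw [List.foldl_cons, ih, hx]
      omega

lemma max_zero_foldl_max (xs : List Int) : ∀ (v : Int),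
    max 0 (xs.foldl max v) = ((max v.toNat (natMax xs) : Nat) : Int) := by
  induction xs with
  | nil => intro v; simp [natMax]; omega
  | cons x xs ih =>
      intro v
      rw [List.foldl_cons, ih (max v x)]
      have hx : natMax (x :: xs) = max x.toNat (natMax xs) := by
        rw [natMax, List.foldl_cons, foldl_natmax_init]
        omega
      rw [hx]
      congr 1
      omega

lemma maxD_bridge (xs : List Int) :
    max 0 (PySem.List.maxD xs (fun x => x) 0) = ((natMax xs : Nat) : Int) := by
  cases xs with
  | nil => simp [PySem.List.maxD, PySem.List.max?, natMax]
  | cons x t =>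
      rw [PySem.List.maxD, PySem.List.max?_id_cons, Option.getD_some, max_zero_foldl_max]
      have hx : natMax (x :: t) = max x.toNat (natMax t) := by
        rw [natMax, List.foldl_cons, foldl_natmax_init]
        omega
      rw [hx]

lemma natMax_dropTake (a : List Int) (m : Nat) :
    ∀ l0, l0 + m <= a.length →
    natMax ((a.drop l0).take m) = (Finset.Ico l0 (l0+m)).sup (gnat a) := by
  induction m with
  | zero => intro l0 _; simp [natMax]
  | succ m ih =>
      intro l0 h
      have hl : l0 < a.length := by omega
      rw [List.drop_eq_getElem_cons hl, List.take_succ_cons]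
      have hx : natMax (a[l0] :: (a.drop (l0+1)).take m) = max a[l0].toNat (natMax ((a.drop (l0+1)).take m)) := by
        rw [natMax, List.foldl_cons, foldl_natmax_init]
        omega
      rw [hx, ih (l0+1) (by omega)]
      have hIco : Finset.Ico l0 (l0+(m+1)) = insert l0 (Finset.Ico (l0+1) (l0+1+m)) := by
        ext p
        simp only [Finset.mem_Ico, Finset.mem_insert]
        omega
      rw [hIco, Finset.sup_insert]
      have hg : gnat a l0 = a[l0].toNat := by
        rw [gnat, List.getD_eq_getElem?_getD, List.getElem?_eq_getElem hl, Option.getD_some]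
      rw [hg]

lemma slice_empty_of_clamp (a : List Int) (ql qh : Int)
    (h : PySem.List.clampIdx a.length qh <= PySem.List.clampIdx a.length ql) :
    PySem.List.slice a (some ql) (some qh) = [] := by
  have hlen := PySem.List.length_slice a ql qh
  have : (PySem.List.slice a (some ql) (some qh)).length = 0 := by omega
  exact List.eq_nil_of_length_eq_zero this

lemma queryA_init (a : List Int) (l0 h0 : Nat) (hlt : l0 < h0) (hh0 : h0 <= a.length) :
    ∃ C', C' ⊆ Finset.Ico l0 h0 ∧
      queryLoop (buildTree a) (2*a.length+2) ((l0 + a.length : Nat) : Int) ((h0 + a.length : Nat) : Int) 0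
        = ((C'.sup (gnat a) : Nat) : Int) ∧
      ((l0 = 0 ∧ h0 = a.length ∧ 2 <= a.length ∧ ∃ k', a.length = 2^k') ∨ C' = Finset.Ico l0 h0) := by
  refine ql_main a l0 h0 hlt hh0 (2*a.length+2) 0 (l0 + a.length) (h0 + a.length) 0 ∅
      (ceilPow_zero _).symm
      (by rw [pow_zero, Nat.div_one])
      (by have := Nat.lt_two_pow_self (n := 2*a.length+2); omega)
      (by simp)
      (Finset.empty_subset _)
      ?_ ?_
  · rw [Finset.empty_union]
    ext p
    simp only [Finset.mem_Ico, Finset.mem_biUnion]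
    constructor
    · intro hp
      refine ⟨p + a.length, ⟨by omega, by omega⟩, ?_⟩
      rw [covr_leaf _ _ (by omega) (by omega)]
      simp
    · rintro ⟨j, ⟨hj1, hj2⟩, hp⟩
      rw [covr_leaf _ _ (by omega) (by omega), Finset.mem_singleton] at hp
      omega
  · intro j hj p hp
    rw [Finset.mem_Ico] at hj
    rw [covr_leaf _ _ (by omega) (by omega), Finset.mem_singleton] at hp
    rw [Finset.mem_Ico]
    omega

lemma queryB_val (a : List Int) (ql qh : Int) (h0l : 0 <= ql) (hq : ql <= qh) (hhn : qh <= (a.length : Int)) :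
    max 0 (PySem.List.maxD (PySem.List.slice a (some ql) (some qh)) (fun x => x) 0)
      = (((Finset.Ico ql.toNat qh.toNat).sup (gnat a) : Nat) : Int) := by
  rw [PySem.List.slice_toNat a (by omega) (by omega), maxD_bridge,
      natMax_dropTake a (qh.toNat - ql.toNat) ql.toNat (by omega)]
  have he : ql.toNat + (qh.toNat - ql.toNat) = qh.toNat := by omega
  rw [he]

lemma perquery_zero (a : List Int) (ql qh : Int) (hlh : qh <= ql)
    (hPre : (0 <= ql ∧ 0 <= qh ∧ (qh <= ql ∨ qh <= (a.length : Int))) ∨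
            (ql < 0 ∧ qh <= ql) ∨
            (0 <= ql ∧ qh < 0 ∧ ((a.length : Int) + qh <= 0 ∨ (a.length : Int) + qh <= ql))) :
    queryLoop (buildTree a) (2*a.length + 2) (ql + (a.length : Int)) (qh + (a.length : Int)) 0 = 0 ∧
    max 0 (PySem.List.maxD (PySem.List.slice a (some ql) (some qh)) (fun x => x) 0) = 0 := by
  have hcl : PySem.List.clampIdx a.length qh <= PySem.List.clampIdx a.length ql := by
    rcases hPre with ⟨h1,h2,h3⟩ | ⟨h1,h2⟩ | ⟨h1,h2,h3⟩ <;>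
      (unfold PySem.List.clampIdx; split_ifs <;> omega)
  rw [queryLoop_stop _ _ _ _ _ (by omega), slice_empty_of_clamp a ql qh hcl]
  simp [PySem.List.maxD, PySem.List.max?]

lemma perquery_le (a : List Int) (ql qh : Int)
    (hPre : (0 <= ql ∧ 0 <= qh ∧ (qh <= ql ∨ qh <= (a.length : Int))) ∨
            (ql < 0 ∧ qh <= ql) ∨
            (0 <= ql ∧ qh < 0 ∧ ((a.length : Int) + qh <= 0 ∨ (a.length : Int) + qh <= ql))) :
    queryLoop (buildTree a) (2*a.length + 2) (ql + (a.length : Int)) (qh + (a.length : Int)) 0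
      <= max 0 (PySem.List.maxD (PySem.List.slice a (some ql) (some qh)) (fun x => x) 0) := by
  by_cases hlh : qh <= ql
  · obtain ⟨h1, h2⟩ := perquery_zero a ql qh hlh hPre
    rw [h1, h2]
  · have hrange : 0 <= ql ∧ qh <= (a.length:Int) := by
      rcases hPre with ⟨h1,h2,h3⟩ | ⟨h1,h2⟩ | ⟨h1,h2,h3⟩ <;> omega
    have hcast1 : ql + (a.length:Int) = ((ql.toNat + a.length : Nat):Int) := by omega
    have hcast2 : qh + (a.length:Int) = ((qh.toNat + a.length : Nat):Int) := by omega
    rw [hcast1, hcast2, queryB_val a ql qh (by omega) (by omega) (by omega)]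
    obtain ⟨C', hsub, heq, _⟩ := queryA_init a ql.toNat qh.toNat (by omega) (by omega)
    rw [heq]
    have := Finset.sup_mono (f := gnat a) hsub
    omega

-- On the full-range query over a power-of-two length ≥ 2, A's loop reads only the
-- never-written root t[1] = 0 and returns 0.
lemma queryLoop_pow2_zero (a : List Int) (hn2 : 2 <= a.length) :
    ∀ (f k : Nat), 1 <= k → k < f →
    queryLoop (buildTree a) f ((2^k : Nat) : Int) ((2^(k+1) : Nat) : Int) 0 = 0 := by
  intro f
  induction f with
  | zero => intro k h1 h2; omega
  | succ f ih =>
      intro k h1 h2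
      have hcast : ((2^k : Nat) : Int) < ((2^(k+1) : Nat) : Int) := by
        have e : (2:Nat)^(k+1) = 2^k*2 := by rw [← pow_succ]
        have := Nat.two_pow_pos k
        omega
      have hmodL : (2:Nat)^k % 2 = 0 := by
        have e : (2:Nat)^k = 2^(k-1)*2 := by rw [← pow_succ]; congr 1; omega
        omega
      have hmodR : (2:Nat)^(k+1) % 2 = 0 := by
        have e : (2:Nat)^(k+1) = 2^k*2 := by rw [← pow_succ]
        omega
      have hevL : ¬ PySem.Int.band ((2^k : Nat) : Int) 1 ≠ 0 := by
        rw [band_one_natCast]; omega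
      have hevR : ¬ PySem.Int.band ((2^(k+1) : Nat) : Int) 1 ≠ 0 := by
        rw [band_one_natCast]; omega
      rw [queryLoop_step _ _ _ _ _ hcast, if_neg hevL, if_neg hevR, if_neg hevR, if_neg hevL,
          floordiv_two_natCast, floordiv_two_natCast]
      have hdl : (2:Nat)^k / 2 = 2^(k-1) := by
        have e : (2:Nat)^k = 2^(k-1)*2 := by rw [← pow_succ]; congr 1; omega
        omega
      have hdr : (2:Nat)^(k+1) / 2 = 2^k := by
        have e : (2:Nat)^(k+1) = 2^k*2 := by rw [← pow_succ]
        omega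
      rw [hdl, hdr]
      by_cases hk1 : k = 1
      · subst hk1
        obtain ⟨f', rfl⟩ : ∃ f', f = f' + 1 := ⟨f - 1, by omega⟩
        have hc12 : ((2^0 : Nat) : Int) < ((2^1 : Nat) : Int) := by norm_num
        have hb1 : PySem.Int.band ((2^0 : Nat) : Int) 1 ≠ 0 := by
          rw [band_one_natCast]; norm_num
        have hb2 : ¬ PySem.Int.band ((2^1 : Nat) : Int) 1 ≠ 0 := by
          rw [band_one_natCast]; norm_num
        rw [queryLoop_step _ _ _ _ _ hc12, if_neg hb2, if_neg hb2, if_pos hb1, if_pos hb1]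
        have ht1 : tget (buildTree a) ((2^0 : Nat) : Int) = 0 := by
          rw [show ((2^0:Nat):Int) = ((1:Nat):Int) from by norm_num,
              tget_eq _ 1 (by rw [buildTree_length]; omega), buildTree_one a hn2]
        rw [ht1, show ((2^0:Nat):Int) + 1 = ((2:Nat):Int) from by norm_num,
            floordiv_two_natCast, floordiv_two_natCast,
            queryLoop_stop _ _ _ _ _ (by norm_num)]
        norm_num
      · have e1 : k - 1 + 1 = k := by omega
        have := ih (k-1) (by omega) (by omega)
        rw [e1] at this
        exact this

lemma perquery (a : List Int) (qs : List (Int × Int)) (hD : ¬ D_solution a qs)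
    (q : Int × Int) (hq : q ∈ qs)
    (hPre : (0 <= q.1 ∧ 0 <= q.2 ∧ (q.2 <= q.1 ∨ q.2 <= (a.length : Int))) ∨
            (q.1 < 0 ∧ q.2 <= q.1) ∨
            (0 <= q.1 ∧ q.2 < 0 ∧ ((a.length : Int) + q.2 <= 0 ∨ (a.length : Int) + q.2 <= q.1))) :
    queryLoop (buildTree a) (2*a.length + 2) (q.1 + (a.length : Int)) (q.2 + (a.length : Int)) 0
      = max 0 (PySem.List.maxD (PySem.List.slice a (some q.1) (some q.2)) (fun x => x) 0) := by
  obtain ⟨ql, qh⟩ := q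
  dsimp only at hPre ⊢
  by_cases hlh : qh <= ql
  · obtain ⟨h1, h2⟩ := perquery_zero a ql qh hlh hPre
    rw [h1, h2]
  · have hrange : 0 <= ql ∧ qh <= (a.length:Int) := by
      rcases hPre with ⟨h1,h2,h3⟩ | ⟨h1,h2⟩ | ⟨h1,h2,h3⟩ <;> omega
    set l0 := ql.toNat with hl0
    set h0 := qh.toNat with hh0def
    have hcast1 : ql + (a.length:Int) = ((l0 + a.length : Nat):Int) := by omega
    have hcast2 : qh + (a.length:Int) = ((h0 + a.length : Nat):Int) := by omega
    rw [hcast1, hcast2, queryB_val a ql qh (by omega) (by omega) (by omega)]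
    obtain ⟨C', hsub, heq, hdisj⟩ := queryA_init a l0 h0 (by omega) (by omega)
    rcases hdisj with hbad | hCT
    · obtain ⟨hl00, hh0n, hn2, k', hpow⟩ := hbad
      have hq0 : ql = 0 := by omega
      have hqn : qh = (a.length:Int) := by omega
      have hnotpos : ¬ ∃ x ∈ a, 0 < x := by
        intro hex
        apply hD
        refine ⟨⟨hn2, by rw [hpow, Nat.log2_two_pow]⟩, ?_, hex⟩
        rw [hq0, hqn] at hq
        exact hq
      have hall : ∀ x ∈ a, x <= 0 := by
        intro x hx
        by_contra hpos
        exact hnotpos ⟨x, hx, by omega⟩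
      have hzero : ∀ (S : Finset Nat), S ⊆ Finset.Ico l0 h0 → S.sup (gnat a) = 0 := by
        intro S hS
        refine Nat.le_zero.1 (Finset.sup_le ?_)
        intro p hp
        have hpn : p < a.length := by
          have := hS hp
          rw [Finset.mem_Ico] at this
          omega
        have hmem : a.getD p 0 ∈ a := by
          rw [List.getD_eq_getElem?_getD, List.getElem?_eq_getElem hpn, Option.getD_some]
          exact List.getElem_mem _
        have := hall _ hmem
        rw [gnat]
        omega
      rw [heq, hzero C' hsub, hzero (Finset.Ico l0 h0) (fun x hx => hx)]
    · rw [heq, hCT]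

-- ===== VERDICT (by name: the statement is the Claim_ definition above) =====
theorem solution_spec : Claim_unchanged_solution := by
  intro a qs _hdom hpre hD
  show solution a qs = solution_alt a qs
  unfold solution solution_alt
  refine PySem.List.foldl_congr_mem qs _ _ 0 ?_
  intro acc q hq
  rw [perquery a qs hD q hq (hpre q hq)]

theorem solution_changed : Claim_changed_solution := by
  unfold Claim_changed_solution; decide

theorem solution_tight : Claim_exact_solution := by
  intro a qs _hdom hpre hD
  obtain ⟨⟨hn2, hlog⟩, hmem, x, hxa, hxpos⟩ := hD
  show solution a qs ≠ solution_alt a qs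
  refine ne_of_lt ?_
  show (qs.foldl (fun ans q => ans + queryLoop (buildTree a) (2*a.length + 2) (q.1 + (a.length:Int)) (q.2 + (a.length:Int)) 0) 0)
      < (qs.foldl (fun ans q => ans + max 0 (PySem.List.maxD (PySem.List.slice a (some q.1) (some q.2)) (fun x => x) 0)) 0)
  rw [PySem.List.foldl_add, PySem.List.foldl_add, zero_add, zero_add]
  refine List.sum_lt_sum _ _ (fun q hq => perquery_le a q.1 q.2 (hpre q hq)) ⟨(0, (a.length:Int)), hmem, ?_⟩
  dsimp only
  -- A returns 0 on the full-range power-of-two query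
  have hK1 : 1 <= Nat.log2 a.length := by
    by_contra h
    have h0 : Nat.log2 a.length = 0 := by omega
    rw [h0, pow_zero] at hlog
    omega
  have hKf : Nat.log2 a.length < 2*a.length + 2 := by
    have := Nat.lt_two_pow_self (n := Nat.log2 a.length)
    omega
  have e1 : (0:Int) + (a.length:Int) = ((2^(Nat.log2 a.length) : Nat) : Int) := by
    rw [← hlog]; omega
  have e2 : (a.length:Int) + (a.length:Int) = ((2^(Nat.log2 a.length + 1) : Nat) : Int) := by
    have e : (2:Nat)^(Nat.log2 a.length + 1) = a.length * 2 := by rw [pow_succ, ← hlog]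
    omega
  rw [e1, e2, queryLoop_pow2_zero a hn2 (2*a.length+2) (Nat.log2 a.length) hK1 hKf]
  -- B returns the positive range maximum
  rw [queryB_val a 0 (a.length:Int) (by omega) (by omega) (by omega)]
  obtain ⟨i, hi, hieq⟩ := List.getElem_of_mem hxa
  have hg : 1 <= gnat a i := by
    rw [gnat, List.getD_eq_getElem?_getD, List.getElem?_eq_getElem hi, Option.getD_some, hieq]
    omega
  have hle := Finset.le_sup (f := gnat a)
      (show i ∈ Finset.Ico (0:Int).toNat ((a.length:Int)).toNat by
        simp only [Finset.mem_Ico, Int.toNat_natCast]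
        omega)
  omega
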